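-- pv_equiv track=rewrite | github.com/Jy1225/RepoAuditJavaMLK | src/tstool/dfbscan_extractor/Java/Java_MLK_extractor.py | _looks_collection_type
-- ===== SOURCE A (Python) =====
-- def _looks_collection_type(type_name: str) -> bool:
--     if not type_name:
--         return False
--     lower = type_name.lower()
--     tokens = [
--         "list",
--         "set",
--         "map",
--         "queue",
--         "deque",
--         "stack",
--         "collection",
--         "vector",
--         "table",
--         "dict",
--         "bag",
--         "pool",
--         "registry",
--         "buffer",
--     ]
--     return any(tok in lower for tok in tokens)
-- ===== SOURCE B (Python) =====
-- _TOKENS = (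
--     "list", "set", "map", "queue", "deque", "stack", "collection",
--     "vector", "table", "dict", "bag", "pool", "registry", "buffer",
-- )
--
--
-- def _looks_collection_type(type_name: str) -> bool:
--     # Single left-to-right pass: at each position, test whether any token
--     # starts there, instead of 14 separate full substring scans.
--     lower = type_name.lower()
--     return any(
--         lower.startswith(tok, i)
--         for i in range(len(lower))
--         for tok in _TOKENS
--     )
-- ===== Notes on version B (the rewrite author's own statement) =====
-- stated objective: alternative
-- what changed: Replaces 14 independent full substring scans ('tok in lower' per token) with a single left-to-right pass over the string that at each position tests whether any token starts there.
import Mathlib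
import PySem

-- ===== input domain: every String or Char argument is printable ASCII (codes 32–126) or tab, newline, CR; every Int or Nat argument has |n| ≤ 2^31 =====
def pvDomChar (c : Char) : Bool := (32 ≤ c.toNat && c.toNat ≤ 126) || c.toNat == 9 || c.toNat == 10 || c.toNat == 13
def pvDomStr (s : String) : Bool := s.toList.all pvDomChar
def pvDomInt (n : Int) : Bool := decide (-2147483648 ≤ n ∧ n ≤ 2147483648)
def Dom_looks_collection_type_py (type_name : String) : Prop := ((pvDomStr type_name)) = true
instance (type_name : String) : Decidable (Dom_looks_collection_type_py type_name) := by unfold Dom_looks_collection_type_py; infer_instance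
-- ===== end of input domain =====

-- B replaces A's 14 independent substring scans with one left-to-right pass
-- testing at each position whether any token starts there (objective: alternative).

-- ===== PORT A =====
def pvTokens : List String :=
  ["list", "set", "map", "queue", "deque", "stack", "collection",
   "vector", "table", "dict", "bag", "pool", "registry", "buffer"]

def looks_collection_type_py (type_name : String) : Bool :=
  if type_name.toList = [] then false
  else
    let lower := PySem.Str.lower type_name
    pvTokens.any (fun tok => PySem.Str.isIn tok lower)

-- ===== PORT B =====
def looks_collection_type_py_alt (type_name : String) : Bool :=
  let lower := PySem.Str.lower type_name
  (List.range lower.toList.length).any (fun i =>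
    pvTokens.any (fun tok => PySem.Chars.startswith (lower.toList.drop i) tok.toList))

-- ===== PRECONDITION & SPEC =====
def Spec_looks_collection_type_py (type_name : String) (out : Bool) : Prop := out = looks_collection_type_py_alt type_name
instance (type_name : String) (out : Bool) : Decidable (Spec_looks_collection_type_py type_name out) := by unfold Spec_looks_collection_type_py; infer_instance

-- ===== CLAIM (what is proved, stated in full; the proofs are below) =====
def Claim_equal_looks_collection_type_py : Prop := ∀ (type_name : String), Dom_looks_collection_type_py type_name → Spec_looks_collection_type_py type_name (looks_collection_type_py type_name)

-- ===== LEMMAS AND PROOFS =====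

theorem pv_any_congr {α : Type} {l : List α} {f g : α → Bool}
    (h : ∀ x ∈ l, f x = g x) : l.any f = l.any g := by
  induction l with
  | nil => rfl
  | cons a t ih =>
    simp only [List.any_cons, h a (List.mem_cons_self ..),
      ih (fun x hx => h x (List.mem_cons_of_mem _ hx))]

-- a nonempty pattern occurs as a substring iff it is a prefix at some position < length
theorem isIn_eq_range_any (sub l : List Char) (hsub : sub ≠ []) :
    PySem.Chars.isIn sub l =
      (List.range l.length).any (fun i => PySem.Chars.startswith (l.drop i) sub) := by
  by_cases h : PySem.Chars.isIn sub l = true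
  · rw [h]
    obtain ⟨j, hj⟩ := (PySem.Chars.exists_prefix_drop_iff_isIn sub l).mpr h
    have hjlt : j < l.length := by
      by_contra hge
      have : l.drop j = [] := List.drop_eq_nil_of_le (by omega)
      rw [this] at hj
      exact hsub (List.prefix_nil.mp hj)
    symm
    simp only [List.any_eq_true, List.mem_range]
    exact ⟨j, hjlt, (PySem.Chars.startswith_iff _ _).mpr hj⟩
  · rw [Bool.not_eq_true] at h
    rw [h]
    symm
    rw [Bool.eq_false_iff]
    intro hany
    simp only [List.any_eq_true, List.mem_range] at hany
    obtain ⟨i, _, hi⟩ := hany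
    have : PySem.Chars.isIn sub l = true :=
      (PySem.Chars.exists_prefix_drop_iff_isIn sub l).mp
        ⟨i, (PySem.Chars.startswith_iff _ _).mp hi⟩
    simp [h] at this

-- ===== VERDICT (by name: the statement is the Claim_ definition above) =====
theorem looks_collection_type_py_spec : Claim_equal_looks_collection_type_py := by
  intro type_name _
  unfold Spec_looks_collection_type_py looks_collection_type_py looks_collection_type_py_alt
  set l := (PySem.Str.lower type_name).toList with hl
  by_cases hemp : type_name.toList = []
  · have hlen : PySem.Chars.lower type_name.toList = [] := by rw [hemp]; rfl
    simp [hemp, PySem.Str.toList_lower, PySem.Chars.lower]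
  · simp only [if_neg hemp]
    -- turn Str.isIn into Chars.isIn on l, then rewrite each token via the lemma and swap the anys
    have hstep : pvTokens.any (fun tok => PySem.Str.isIn tok (PySem.Str.lower type_name)) =
        pvTokens.any (fun tok =>
          (List.range l.length).any (fun i => PySem.Chars.startswith (l.drop i) tok.toList)) := by
      apply pv_any_congr
      intro tok htok
      have h1 : PySem.Str.isIn tok (PySem.Str.lower type_name) =
          PySem.Chars.isIn tok.toList l := by
        simp [PySem.Str.isIn, hl]
      rw [h1, isIn_eq_range_any]
      fin_cases htok <;> decide
    rw [hstep]
    -- swap the two 'any's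
    cases hb : (List.range l.length).any (fun i =>
        pvTokens.any (fun tok => PySem.Chars.startswith (l.drop i) tok.toList)) with
    | false =>
      rw [Bool.eq_false_iff]
      intro hc
      simp only [List.any_eq_true] at hc
      obtain ⟨tok, htok, i, hi, hp⟩ := hc
      rw [Bool.eq_false_iff] at hb
      exact hb (by simp only [List.any_eq_true]; exact ⟨i, hi, tok, htok, hp⟩)
    | true =>
      simp only [List.any_eq_true] at hb ⊢
      obtain ⟨i, hi, tok, htok, hp⟩ := hb
      exact ⟨tok, htok, i, hi, hp⟩
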